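-- pv_equiv track=rewrite | github.com/Icansee-you/w2 | streamlit_app.py | _find_category_match_by_keywords
-- ===== SOURCE A (Python) =====
-- from typing import Optional, List, Dict, Any
--
-- def _find_category_match_by_keywords(cat_name: str) -> Optional[str]:
--     """Find matching new category based on partial keywords."""
--     cat_lower = cat_name.lower()
--
--     # Koningshuis keywords (highest priority)
--     if any(kw in cat_lower for kw in ['koningshuis', 'koning', 'koningin', 'prins', 'oranje']):
--         return 'Koningshuis'
--
--     # Misdaad keywords
--     if any(kw in cat_lower for kw in ['misdaad', 'crimineel', 'diefstal', 'moord', 'aanslag', 'drugs']):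
--         return 'Misdaad'
--
--     # Sport keywords
--     if any(kw in cat_lower for kw in ['sport', 'voetbal', 'wielrennen', 'olympisch']):
--         return 'Sport'
--
--     # Politiek keywords
--     if any(kw in cat_lower for kw in ['politiek', 'kabinet', 'minister', 'regering', 'gemeente']):
--         return 'Politiek'
--
--     # Buitenland keywords
--     if any(kw in cat_lower for kw in ['buitenland', 'internationaal', 'conflict', 'europa', 'oorlog']):
--         return 'Buitenland'
--
--     # Cultuur keywords
--     if any(kw in cat_lower for kw in ['cultuur', 'kunst', 'museum', 'theater', 'muziek']):
--         return 'Cultuur'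
--
--     # Opmerkelijk keywords
--     if any(kw in cat_lower for kw in ['opmerkelijk', 'bijzonder', 'vreemd', 'grappig']):
--         return 'Opmerkelijk'
--
--     # Algemeen (default)
--     if any(kw in cat_lower for kw in ['algemeen', 'overig', 'nieuws']):
--         return 'Algemeen'
--
--     return None
-- ===== SOURCE B (Python) =====
-- from typing import Optional
--
-- # Different algorithm: instead of testing each keyword against the string,
-- # slide over the lowered string and hash-look-up each candidate substring in a
-- # keyword->priority dict, keeping the smallest (highest-priority) match seen.
--
-- _CATS = ['Koningshuis', 'Misdaad', 'Sport', 'Politiek', 'Buitenland',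
--          'Cultuur', 'Opmerkelijk', 'Algemeen']
--
-- _KW_PRIO = {
--     'koningshuis': 0, 'koning': 0, 'koningin': 0, 'prins': 0, 'oranje': 0,
--     'misdaad': 1, 'crimineel': 1, 'diefstal': 1, 'moord': 1, 'aanslag': 1, 'drugs': 1,
--     'sport': 2, 'voetbal': 2, 'wielrennen': 2, 'olympisch': 2,
--     'politiek': 3, 'kabinet': 3, 'minister': 3, 'regering': 3, 'gemeente': 3,
--     'buitenland': 4, 'internationaal': 4, 'conflict': 4, 'europa': 4, 'oorlog': 4,
--     'cultuur': 5, 'kunst': 5, 'museum': 5, 'theater': 5, 'muziek': 5,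
--     'opmerkelijk': 6, 'bijzonder': 6, 'vreemd': 6, 'grappig': 6,
--     'algemeen': 7, 'overig': 7, 'nieuws': 7,
-- }
--
-- _LENGTHS = [5, 6, 7, 8, 9, 10, 11, 14]  # the distinct keyword lengths
--
-- def _find_category_match_by_keywords(cat_name):
--     s = cat_name.lower()
--     best = None
--     for i in range(len(s)):
--         for L in _LENGTHS:
--             p = _KW_PRIO.get(s[i:i+L])
--             if p is not None and (best is None or p < best):
--                 best = p
--     return None if best is None else _CATS[best]
-- ===== Notes on version B (the rewrite author's own statement) =====
-- stated objective: alternative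
-- what changed: Instead of testing each of the 37 keywords against the string, B slides over the lowered string and looks every candidate substring (one per keyword length) up in a keyword-to-priority dict, keeping the smallest priority seen; the category is read off a priority-indexed list at the end.
import Mathlib
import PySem

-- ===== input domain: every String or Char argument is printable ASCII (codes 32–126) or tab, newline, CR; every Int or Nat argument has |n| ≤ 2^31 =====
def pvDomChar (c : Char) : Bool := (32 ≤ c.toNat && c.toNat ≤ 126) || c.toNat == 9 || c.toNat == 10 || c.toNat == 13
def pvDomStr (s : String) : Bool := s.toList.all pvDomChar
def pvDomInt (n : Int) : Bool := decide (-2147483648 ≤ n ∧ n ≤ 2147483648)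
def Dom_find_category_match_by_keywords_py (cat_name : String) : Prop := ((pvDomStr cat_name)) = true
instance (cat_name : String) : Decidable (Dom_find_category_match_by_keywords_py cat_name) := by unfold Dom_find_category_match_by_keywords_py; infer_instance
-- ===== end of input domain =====

-- B replaces A's eight unrolled per-keyword substring tests with a multi-pattern scan: it slides over the
-- lowered string, hash-looks-up each candidate substring in a keyword→priority dict, and keeps the smallest
-- priority seen (objective: alternative — a genuinely different algorithm, not claimed faster).


-- ===== PORT A =====
def find_category_match_by_keywords_py (cat_name : String) : Option String :=
  let cat_lower := PySem.Str.lower cat_name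
  if (["koningshuis", "koning", "koningin", "prins", "oranje"].any
      (fun kw => PySem.Str.isIn kw cat_lower)) then some "Koningshuis"
  else if (["misdaad", "crimineel", "diefstal", "moord", "aanslag", "drugs"].any
      (fun kw => PySem.Str.isIn kw cat_lower)) then some "Misdaad"
  else if (["sport", "voetbal", "wielrennen", "olympisch"].any
      (fun kw => PySem.Str.isIn kw cat_lower)) then some "Sport"
  else if (["politiek", "kabinet", "minister", "regering", "gemeente"].any
      (fun kw => PySem.Str.isIn kw cat_lower)) then some "Politiek"
  else if (["buitenland", "internationaal", "conflict", "europa", "oorlog"].any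
      (fun kw => PySem.Str.isIn kw cat_lower)) then some "Buitenland"
  else if (["cultuur", "kunst", "museum", "theater", "muziek"].any
      (fun kw => PySem.Str.isIn kw cat_lower)) then some "Cultuur"
  else if (["opmerkelijk", "bijzonder", "vreemd", "grappig"].any
      (fun kw => PySem.Str.isIn kw cat_lower)) then some "Opmerkelijk"
  else if (["algemeen", "overig", "nieuws"].any
      (fun kw => PySem.Str.isIn kw cat_lower)) then some "Algemeen"
  else none

-- ===== PORT B =====
-- Source B's _CATS
def pvCats : List String :=
  ["Koningshuis", "Misdaad", "Sport", "Politiek", "Buitenland", "Cultuur", "Opmerkelijk", "Algemeen"]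

-- Source B's _KW_PRIO dict (keys are distinct, so first-match lookup = dict lookup)
def pvKw : List (List Char × Nat) :=
  [("koningshuis".toList, 0), ("koning".toList, 0), ("koningin".toList, 0), ("prins".toList, 0), ("oranje".toList, 0),
   ("misdaad".toList, 1), ("crimineel".toList, 1), ("diefstal".toList, 1), ("moord".toList, 1), ("aanslag".toList, 1), ("drugs".toList, 1),
   ("sport".toList, 2), ("voetbal".toList, 2), ("wielrennen".toList, 2), ("olympisch".toList, 2),
   ("politiek".toList, 3), ("kabinet".toList, 3), ("minister".toList, 3), ("regering".toList, 3), ("gemeente".toList, 3),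
   ("buitenland".toList, 4), ("internationaal".toList, 4), ("conflict".toList, 4), ("europa".toList, 4), ("oorlog".toList, 4),
   ("cultuur".toList, 5), ("kunst".toList, 5), ("museum".toList, 5), ("theater".toList, 5), ("muziek".toList, 5),
   ("opmerkelijk".toList, 6), ("bijzonder".toList, 6), ("vreemd".toList, 6), ("grappig".toList, 6),
   ("algemeen".toList, 7), ("overig".toList, 7), ("nieuws".toList, 7)]

-- Source B's _LENGTHS
def pvLens : List Nat := [5, 6, 7, 8, 9, 10, 11, 14]

-- 'best = p if best is None or p < best else best'
def pvOMin (best : Option Nat) (p : Nat) : Option Nat :=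
  match best with
  | none => some p
  | some b => if p < b then some p else some b

def find_category_match_by_keywords_py_alt (cat_name : String) : Option String :=
  let s := (PySem.Str.lower cat_name).toList
  let best := (List.range s.length).foldl (fun (best : Option Nat) (i : Nat) =>
    pvLens.foldl (fun (best : Option Nat) (L : Nat) =>
      -- p = _KW_PRIO.get(s[i:i+L])  (PySem slice = Python string slice on the code points)
      match List.lookup (PySem.List.slice s (some (i : Int)) (some ((i : Int) + (L : Int)))) pvKw with
      | some p => pvOMin best p
      | none => best) best) none
  match best with
  | none => none
  | some b => some (PySem.List.pyGetD pvCats ((b : Nat) : Int) "")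

-- ===== PRECONDITION & SPEC =====
def Spec_find_category_match_by_keywords_py (cat_name : String) (out : Option String) : Prop := out = find_category_match_by_keywords_py_alt cat_name
instance (cat_name : String) (out : Option String) : Decidable (Spec_find_category_match_by_keywords_py cat_name out) := by unfold Spec_find_category_match_by_keywords_py; infer_instance

-- ===== CLAIM (what is proved, stated in full; the proofs are below) =====
def Claim_equal_find_category_match_by_keywords_py : Prop := ∀ (cat_name : String), Dom_find_category_match_by_keywords_py cat_name → Spec_find_category_match_by_keywords_py cat_name (find_category_match_by_keywords_py cat_name)

-- ===== LEMMAS AND PROOFS =====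

-- all priorities B's scan can ever collect, as one flat list
def pvHits (s : List Char) : List Nat :=
  (List.range s.length).flatMap (fun i => pvLens.filterMap (fun L => List.lookup ((s.drop i).take L) pvKw))

-- "some keyword of priority p occurs in s"
def pvCond (s : List Char) (p : Nat) : Prop := ∃ kw, (kw, p) ∈ pvKw ∧ kw <:+: s

theorem pv_kw_facts : ∀ q ∈ pvKw, q.1.length ∈ pvLens ∧ q.1 ≠ [] ∧ q.2 < 8 := by decide

theorem pv_kw_nodup : (pvKw.map Prod.fst).Nodup := by decide

theorem pv_lookup_of_mem {α β : Type} [BEq α] [LawfulBEq α] {l : List (α × β)} {k : α} {p : β}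
    (h : (k, p) ∈ l) (hn : (l.map Prod.fst).Nodup) : l.lookup k = some p := by
  induction l with
  | nil => cases h
  | cons hd tl ih =>
    rw [List.map_cons, List.nodup_cons] at hn
    rcases List.mem_cons.mp h with heq | hmem
    · subst heq; simp [List.lookup]
    · have hk : (k == hd.1) = false := by
        rw [beq_eq_false_iff_ne]
        intro hkeq
        exact hn.1 (hkeq ▸ List.mem_map.mpr ⟨(k, p), hmem, rfl⟩)
      rw [List.lookup, hk]
      exact ih hmem hn.2

theorem pv_mem_of_lookup {α β : Type} [BEq α] [LawfulBEq α] {l : List (α × β)} {k : α} {p : β}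
    (h : l.lookup k = some p) : (k, p) ∈ l := by
  induction l with
  | nil => simp [List.lookup] at h
  | cons hd tl ih =>
    rw [List.lookup] at h
    cases hk : k == hd.1 with
    | true =>
      rw [hk] at h
      have := eq_of_beq hk
      simp at h
      exact List.mem_cons.mpr (Or.inl (by rw [this, ← h]))
    | false =>
      rw [hk] at h
      exact List.mem_cons_of_mem _ (ih h)

theorem pv_mem_hits (s : List Char) (p : Nat) : p ∈ pvHits s ↔ pvCond s p := by
  constructor
  · intro hp
    simp only [pvHits, List.mem_flatMap, List.mem_filterMap, List.mem_range] at hp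
    obtain ⟨i, _, L, _, hlk⟩ := hp
    exact ⟨(s.drop i).take L, pv_mem_of_lookup hlk,
      ((List.take_prefix L _).isInfix).trans ((List.drop_suffix i s).isInfix)⟩
  · rintro ⟨kw, hmem, hinf⟩
    obtain ⟨hlen, hne, -⟩ := pv_kw_facts _ hmem
    have hIs : PySem.Chars.isIn kw s = true := (PySem.Chars.isIn_iff_infix kw s).mpr hinf
    obtain ⟨j, hpre⟩ := (PySem.Chars.exists_prefix_drop_iff_isIn kw s).mpr hIs
    have hj : j < s.length := by
      by_contra hjge
      rw [List.drop_eq_nil_of_le (Nat.le_of_not_lt hjge)] at hpre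
      exact hne (List.prefix_nil.mp hpre)
    have htake : (s.drop j).take kw.length = kw := (List.prefix_iff_eq_take.mp hpre).symm
    simp only [pvHits, List.mem_flatMap, List.mem_filterMap, List.mem_range]
    exact ⟨j, hj, kw.length, hlen, by rw [htake]; exact pv_lookup_of_mem hmem pv_kw_nodup⟩

theorem pv_cond_lt8 (s : List Char) (p : Nat) (h : pvCond s p) : p < 8 := by
  obtain ⟨kw, hmem, -⟩ := h
  exact (pv_kw_facts _ hmem).2.2

theorem pvOMin_some (a q : Nat) : pvOMin (some a) q = some (min a q) := by
  show (if q < a then some q else some a) = some (min a q)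
  split_ifs with h <;> rw [Nat.min_def] <;> split_ifs <;> first | rfl | (exfalso; omega)

theorem pv_foldl_omin_some (l : List Nat) (a : Nat) : l.foldl pvOMin (some a) = some (l.foldl min a) := by
  induction l generalizing a with
  | nil => rfl
  | cons h t ih => simp only [List.foldl_cons, pvOMin_some, ih]

theorem pv_foldl_omin_none (l : List Nat) : l.foldl pvOMin none = l.min? := by
  cases l with
  | nil => rfl
  | cons h t =>
    show List.foldl pvOMin (pvOMin none h) t = _
    rw [show pvOMin none h = some h from rfl, pv_foldl_omin_some, List.min?_cons']

theorem pv_foldl_filterMap {α : Type} (f : α → Option Nat) (ls : List α) (acc : Option Nat) :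
    ls.foldl (fun b x => match f x with | some p => pvOMin b p | none => b) acc
      = (ls.filterMap f).foldl pvOMin acc := by
  induction ls generalizing acc with
  | nil => rfl
  | cons hd tl ih => cases hf : f hd <;> simp [hf, ih]

theorem pv_alt_eq (cat_name : String) :
    find_category_match_by_keywords_py_alt cat_name
      = ((pvHits ((PySem.Str.lower cat_name).toList)).min?).map
          (fun b => PySem.List.pyGetD pvCats ((b : Nat) : Int) "") := by
  unfold find_category_match_by_keywords_py_alt
  set s := (PySem.Str.lower cat_name).toList with hs
  have hX : (List.range s.length).foldl (fun (best : Option Nat) (i : Nat) =>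
      pvLens.foldl (fun (best : Option Nat) (L : Nat) =>
        match List.lookup (PySem.List.slice s (some (i : Int)) (some ((i : Int) + (L : Int)))) pvKw with
        | some p => pvOMin best p
        | none => best) best) none = (pvHits s).min? := by
    simp only [PySem.List.slice_natCast_add]
    simp only [pv_foldl_filterMap]
    rw [← List.foldl_flatMap]
    exact pv_foldl_omin_none _
  simp only [hX]
  cases (pvHits s).min? <;> rfl

-- the eight branch conditions of A, each ↔ pvCond at its priority
theorem pv_branch0 (t : String) : ((["koningshuis", "koning", "koningin", "prins", "oranje"].any
    (fun kw => PySem.Str.isIn kw t)) = true) ↔ pvCond t.toList 0 := by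
  simp [pvCond, pvKw, PySem.Chars.isIn_iff_infix, Prod.ext_iff]

theorem pv_branch1 (t : String) : ((["misdaad", "crimineel", "diefstal", "moord", "aanslag", "drugs"].any
    (fun kw => PySem.Str.isIn kw t)) = true) ↔ pvCond t.toList 1 := by
  simp [pvCond, pvKw, PySem.Chars.isIn_iff_infix, Prod.ext_iff]

theorem pv_branch2 (t : String) : ((["sport", "voetbal", "wielrennen", "olympisch"].any
    (fun kw => PySem.Str.isIn kw t)) = true) ↔ pvCond t.toList 2 := by
  simp [pvCond, pvKw, PySem.Chars.isIn_iff_infix, Prod.ext_iff]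

theorem pv_branch3 (t : String) : ((["politiek", "kabinet", "minister", "regering", "gemeente"].any
    (fun kw => PySem.Str.isIn kw t)) = true) ↔ pvCond t.toList 3 := by
  simp [pvCond, pvKw, PySem.Chars.isIn_iff_infix, Prod.ext_iff]

theorem pv_branch4 (t : String) : ((["buitenland", "internationaal", "conflict", "europa", "oorlog"].any
    (fun kw => PySem.Str.isIn kw t)) = true) ↔ pvCond t.toList 4 := by
  simp [pvCond, pvKw, PySem.Chars.isIn_iff_infix, Prod.ext_iff]

theorem pv_branch5 (t : String) : ((["cultuur", "kunst", "museum", "theater", "muziek"].any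
    (fun kw => PySem.Str.isIn kw t)) = true) ↔ pvCond t.toList 5 := by
  simp [pvCond, pvKw, PySem.Chars.isIn_iff_infix, Prod.ext_iff]

theorem pv_branch6 (t : String) : ((["opmerkelijk", "bijzonder", "vreemd", "grappig"].any
    (fun kw => PySem.Str.isIn kw t)) = true) ↔ pvCond t.toList 6 := by
  simp [pvCond, pvKw, PySem.Chars.isIn_iff_infix, Prod.ext_iff]

theorem pv_branch7 (t : String) : ((["algemeen", "overig", "nieuws"].any
    (fun kw => PySem.Str.isIn kw t)) = true) ↔ pvCond t.toList 7 := by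
  simp [pvCond, pvKw, PySem.Chars.isIn_iff_infix, Prod.ext_iff]

-- min? of the hit list is the least matched priority
theorem pv_min_eq (s : List Char) (p : Nat) (hp : pvCond s p)
    (hlow : ∀ q < p, ¬ pvCond s q) : (pvHits s).min? = some p := by
  rw [List.min?_eq_some_iff]
  refine ⟨(pv_mem_hits s p).mpr hp, fun b hb => ?_⟩
  have hcb := (pv_mem_hits s b).mp hb
  by_contra hlt
  exact hlow b (Nat.lt_of_not_le (fun h => hlt h)) hcb

-- ===== VERDICT (by name: the statement is the Claim_ definition above) =====
theorem find_category_match_by_keywords_py_spec : Claim_equal_find_category_match_by_keywords_py := by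
  intro cat_name _
  unfold Spec_find_category_match_by_keywords_py
  rw [pv_alt_eq]
  have h0 := pv_branch0 (PySem.Str.lower cat_name)
  have h1 := pv_branch1 (PySem.Str.lower cat_name)
  have h2 := pv_branch2 (PySem.Str.lower cat_name)
  have h3 := pv_branch3 (PySem.Str.lower cat_name)
  have h4 := pv_branch4 (PySem.Str.lower cat_name)
  have h5 := pv_branch5 (PySem.Str.lower cat_name)
  have h6 := pv_branch6 (PySem.Str.lower cat_name)
  have h7 := pv_branch7 (PySem.Str.lower cat_name)
  set s := (PySem.Str.lower cat_name).toList with hs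
  unfold find_category_match_by_keywords_py
  by_cases c0 : pvCond s 0
  · rw [pv_min_eq s 0 c0 (by omega)]
    rw [if_pos (h0.mpr c0)]
    rfl
  · rw [if_neg (fun h => c0 (h0.mp h))]
    by_cases c1 : pvCond s 1
    · rw [pv_min_eq s 1 c1 (by intro q hq; interval_cases q; all_goals assumption)]
      rw [if_pos (h1.mpr c1)]
      rfl
    · rw [if_neg (fun h => c1 (h1.mp h))]
      by_cases c2 : pvCond s 2
      · rw [pv_min_eq s 2 c2 (by intro q hq; interval_cases q; all_goals assumption)]
        rw [if_pos (h2.mpr c2)]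
        rfl
      · rw [if_neg (fun h => c2 (h2.mp h))]
        by_cases c3 : pvCond s 3
        · rw [pv_min_eq s 3 c3 (by intro q hq; interval_cases q; all_goals assumption)]
          rw [if_pos (h3.mpr c3)]
          rfl
        · rw [if_neg (fun h => c3 (h3.mp h))]
          by_cases c4 : pvCond s 4
          · rw [pv_min_eq s 4 c4 (by intro q hq; interval_cases q; all_goals assumption)]
            rw [if_pos (h4.mpr c4)]
            rfl
          · rw [if_neg (fun h => c4 (h4.mp h))]
            by_cases c5 : pvCond s 5
            · rw [pv_min_eq s 5 c5 (by intro q hq; interval_cases q; all_goals assumption)]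
              rw [if_pos (h5.mpr c5)]
              rfl
            · rw [if_neg (fun h => c5 (h5.mp h))]
              by_cases c6 : pvCond s 6
              · rw [pv_min_eq s 6 c6 (by intro q hq; interval_cases q; all_goals assumption)]
                rw [if_pos (h6.mpr c6)]
                rfl
              · rw [if_neg (fun h => c6 (h6.mp h))]
                by_cases c7 : pvCond s 7
                · rw [pv_min_eq s 7 c7 (by intro q hq; interval_cases q; all_goals assumption)]
                  rw [if_pos (h7.mpr c7)]
                  rfl
                · rw [if_neg (fun h => c7 (h7.mp h))]
                  have hnil : pvHits s = [] := by
                    rw [List.eq_nil_iff_forall_not_mem]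
                    intro p hp
                    have hc := (pv_mem_hits s p).mp hp
                    have := pv_cond_lt8 s p hc
                    interval_cases p <;> [exact c0 hc; exact c1 hc; exact c2 hc; exact c3 hc;
                      exact c4 hc; exact c5 hc; exact c6 hc; exact c7 hc]
                  rw [hnil]
                  rfl
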